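-- pv_equiv track=rewrite | github.com/swang0222/Algorithms-projects | Scheduling.py | myListScheduling
-- ===== SOURCE A (Python) =====
-- from typing import List, Tuple
--
-- def myListScheduling(P, m):
--
--     '''
--     Implement ListScheduling function under here and return the optimal schedule.
--
--     Input:
--     List P: A list of processing time of jobs J_1 ,...., J_n
--     int m: number of parallel and identical processors
--
--     return:
--     List[List[Tuple[int, int]] sol: The optimal schedule for each job on each processor.
--         The i-th index of the outermost list must contain the schedule of jobs for the (i+1)-th processor.
--         (Since processors start from 1 and list indices start from 0).
--         Each pair inside this schedule must contain the following:
--             1. index of job (job index starts at 1 NOT 0!) - int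
--             2. completion time of the job on that respective processor - int
--
--             Note:  the start time of job J_j is the completion time of job J_j−1 on processor Pi.
--                   The start time for the first job on each processor is always 0.
--
--     '''
--
--     result: List[List[Tuple[int, int]]] = [[] for _ in range(m)]
--
--     row_sums = [0] * m
--
--     for i in range(len(P)):
--         min_sum = min(row_sums)
--         min_index = row_sums.index(min_sum)
--         result[min_index].append((i + 1, min_sum + P[i]))
--         row_sums[min_index] += P[i]
--
--
--     return result
-- ===== SOURCE B (Python) =====
-- def myListScheduling(P, m):
--     # Maintain the processor loads as a list of (load, index) pairs kept in
--     # sorted (lexicographic) order: the least-loaded processor is always the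
--     # first pair, so each job pops the front and re-inserts the updated pair
--     # at its sorted position (no min()/index() rescans of the whole list).
--     result = [[] for _ in range(m)]
--     loads = [(0, k) for k in range(m)]  # sorted: all loads 0, indices increasing
--     for i, p in enumerate(P, 1):
--         load, k = loads.pop(0)
--         result[k].append((i, load + p))
--         entry = (load + p, k)
--         j = 0
--         while j < len(loads) and loads[j] < entry:
--             j += 1
--         loads.insert(j, entry)
--     return result
-- ===== Notes on version B (the rewrite author's own statement) =====
-- stated objective: alternative
-- what changed: Instead of rescanning row_sums with min() and .index() for every job, B keeps the processor loads as a list of (load, index) pairs maintained in sorted order: the least-loaded processor is popped from the front and the updated pair is re-inserted at its sorted position.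
import Mathlib
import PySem

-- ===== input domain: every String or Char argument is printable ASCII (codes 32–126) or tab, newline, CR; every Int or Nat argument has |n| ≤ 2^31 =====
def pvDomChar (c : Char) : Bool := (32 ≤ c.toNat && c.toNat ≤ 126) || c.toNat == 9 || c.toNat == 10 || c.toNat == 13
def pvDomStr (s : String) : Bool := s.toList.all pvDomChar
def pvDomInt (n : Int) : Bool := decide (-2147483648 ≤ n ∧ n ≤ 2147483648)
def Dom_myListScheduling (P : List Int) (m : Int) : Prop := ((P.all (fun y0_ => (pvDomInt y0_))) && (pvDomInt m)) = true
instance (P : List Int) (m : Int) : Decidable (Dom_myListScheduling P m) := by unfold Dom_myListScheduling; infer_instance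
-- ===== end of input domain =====

-- B keeps the processor loads as a sorted list of (load, index) pairs (pop front / sorted re-insert)
-- instead of A's min()+.index() rescans per job: an alternative algorithm, same worst-case cost.


-- ===== PORT A =====
-- the for-loop over range(len(P)): state = (job counter i, result, row_sums)
def myAGo : List Int → Int → List (List (Int × Int)) → List Int → List (List (Int × Int))
  | [], _, result, _ => result
  | p :: rest, i, result, rs =>
    match PySem.List.min? rs (fun x => x) with
    | none => result        -- Python: min([]) raises ValueError; excluded by Pre_
    | some ms =>
      match PySem.List.index? rs ms with
      | none => result      -- unreachable (ms ∈ rs)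
      | some mi =>
        myAGo rest (i + 1)
          (result.set mi ((result.getD mi []) ++ [(i, ms + p)]))
          (rs.set mi ((rs.getD mi 0) + p))

def myListScheduling (P : List Int) (m : Int) : List (List (Int × Int)) :=
  myAGo P 1 (List.replicate m.toNat []) (List.replicate m.toNat 0)

-- ===== PORT B =====
-- the while-loop linear sorted insertion of Source B (tuple comparison is lexicographic)
def insortB : List (Int × Int) → (Int × Int) → List (Int × Int)
  | [], x => [x]
  | y :: ys, x =>
    if y.1 < x.1 ∨ (y.1 = x.1 ∧ y.2 < x.2) then y :: insortB ys x else x :: y :: ys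

def myBGo : List Int → Int → List (List (Int × Int)) → List (Int × Int) → List (List (Int × Int))
  | [], _, result, _ => result
  | p :: rest, i, result, loads =>
    match loads with
    | [] => result          -- Python: loads.pop(0) raises IndexError; excluded by Pre_
    | (load, k) :: tl =>
      myBGo rest (i + 1)
        (result.set k.toNat ((result.getD k.toNat []) ++ [(i, load + p)]))
        (insortB tl (load + p, k))

def myListScheduling_alt (P : List Int) (m : Int) : List (List (Int × Int)) :=
  myBGo P 1 (List.replicate m.toNat []) ((List.range m.toNat).map (fun (k : Nat) => ((0 : Int), (k : Int))))

-- ===== PRECONDITION & SPEC =====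
-- Pre_ excludes m ≤ 0 with P nonempty: there A raises ValueError (min of empty row_sums)
-- and B raises IndexError (pop from empty loads); no value is returned by either.
def Pre_myListScheduling (P : List Int) (m : Int) : Prop := P = [] ∨ 1 ≤ m
instance (P : List Int) (m : Int) : Decidable (Pre_myListScheduling P m) := by unfold Pre_myListScheduling; infer_instance

def pvWitness_myListScheduling : List Int × Int := ([2, 1, 3], 2)

def Spec_myListScheduling (P : List Int) (m : Int) (out : List (List (Int × Int))) : Prop := out = myListScheduling_alt P m
instance (P : List Int) (m : Int) (out : List (List (Int × Int))) : Decidable (Spec_myListScheduling P m out) := by unfold Spec_myListScheduling; infer_instance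

-- ===== CLAIM (what is proved, stated in full; the proofs are below) =====
def Claim_equal_myListScheduling : Prop := ∀ (P : List Int) (m : Int), Dom_myListScheduling P m → Pre_myListScheduling P m → Spec_myListScheduling P m (myListScheduling P m)

-- ===== LEMMAS AND PROOFS =====

-- the pairs (row_sums[j], j) that B's sorted loads list is a permutation of
def pairsOf (rs : List Int) : List (Int × Int) :=
  (List.range rs.length).map (fun j => (rs.getD j 0, (j : Int)))

-- Python's lexicographic strict order on int pairs
def lexLT (a b : Int × Int) : Prop := a.1 < b.1 ∨ (a.1 = b.1 ∧ a.2 < b.2)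

lemma insortB_perm (ys : List (Int × Int)) (x : Int × Int) : (insortB ys x).Perm (x :: ys) := by
  induction ys with
  | nil => simp [insortB]
  | cons y t ih =>
    simp only [insortB]
    split_ifs with h
    · exact ((ih.cons y).trans (List.Perm.swap x y t))
    · exact List.Perm.refl _

lemma insortB_pairwise (ys : List (Int × Int)) (x : Int × Int)
    (hs : ys.Pairwise lexLT) (hne : ∀ y ∈ ys, y.2 ≠ x.2) :
    (insortB ys x).Pairwise lexLT := by
  induction ys with
  | nil => simp [insortB]
  | cons y t ih =>
    rcases List.pairwise_cons.mp hs with ⟨hy, ht⟩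
    simp only [insortB]
    split_ifs with h
    · refine List.pairwise_cons.mpr ⟨?_, ih ht (fun z hz => hne z (List.mem_cons_of_mem _ hz))⟩
      intro z hz
      have hz' := (insortB_perm t x).mem_iff.mp hz
      rcases List.mem_cons.mp hz' with rfl | hz''
      · exact h
      · exact hy z hz''
    · refine List.pairwise_cons.mpr ⟨?_, hs⟩
      intro z hz
      rcases List.mem_cons.mp hz with rfl | hz'
      · -- ¬ lexLT y x and y.2 ≠ x.2 gives lexLT x y
        rcases lt_trichotomy x.1 z.1 with h1 | h1 | h1
        · exact Or.inl h1
        · refine Or.inr ⟨h1, ?_⟩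
          have h2 : ¬ z.2 < x.2 := fun hlt => h (Or.inr ⟨h1.symm, hlt⟩)
          have h3 := hne z (List.mem_cons_self)
          omega
        · exact absurd (Or.inl h1) h
      · -- z ∈ t : lexLT x y? no — need lexLT x z; from x ≤ y < z
        have hyz := hy z hz'
        rcases lt_trichotomy x.1 y.1 with h1 | h1 | h1
        · rcases hyz with h2 | h2
          · exact Or.inl (h1.trans h2)
          · exact Or.inl (by omega)
        · have h2 : ¬ y.2 < x.2 := fun hlt => h (Or.inr ⟨h1.symm, hlt⟩)
          rcases hyz with h3 | h3
          · exact Or.inl (by omega)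
          · refine Or.inr ⟨by omega, by omega⟩
        · exact absurd (Or.inl h1) h

lemma mem_pairsOf {rs : List Int} {v : Int × Int} :
    v ∈ pairsOf rs ↔ ∃ j : Nat, j < rs.length ∧ v = (rs.getD j 0, (j : Int)) := by
  simp only [pairsOf, List.mem_map, List.mem_range]
  constructor
  · rintro ⟨j, hj, rfl⟩; exact ⟨j, hj, rfl⟩
  · rintro ⟨j, hj, rfl⟩; exact ⟨j, hj, rfl⟩

lemma pairsOf_snd_nodup (rs : List Int) : ((pairsOf rs).map (·.2)).Nodup := by
  unfold pairsOf
  rw [List.map_map]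
  have heq : ((fun x : Int × Int => x.2) ∘ fun j : Nat => (rs.getD j 0, (j : Int)))
      = fun j : Nat => (j : Int) := rfl
  rw [heq]
  exact List.nodup_range.map (fun a b h => by exact_mod_cast h)

lemma pairsOf_set (rs : List Int) (j : Nat) (hj : j < rs.length) (v : Int) :
    pairsOf (rs.set j v) = (pairsOf rs).set j (v, (j : Int)) := by
  apply List.ext_getElem
  · simp [pairsOf]
  · intro t h1 h2
    have ht : t < rs.length := by simpa [pairsOf] using h2
    simp only [pairsOf, List.length_set, List.getElem_map, List.getElem_range,
      List.getElem_set]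
    by_cases hc : j = t
    · subst hc
      simp [List.getD, hj]
    · rw [if_neg hc]
      have hgd : (rs.set j v).getD t 0 = rs.getD t 0 := by
        simp [List.getD, List.getElem?_set_ne hc]
      rw [hgd]

-- the main step: with the sorted-permutation invariant the two loop bodies agree
lemma go_eq (P : List Int) : ∀ (i : Int) (result : List (List (Int × Int)))
    (rs : List Int) (loads : List (Int × Int)),
    rs ≠ [] → loads.Pairwise lexLT → loads.Perm (pairsOf rs) →
    myAGo P i result rs = myBGo P i result loads := by
  induction P with
  | nil => intro i result rs loads _ _ _; rfl
  | cons p rest ih =>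
    intro i result rs loads hne hsort hperm
    -- loads is nonempty
    have hlen : loads.length = rs.length := by
      simpa [pairsOf] using hperm.length_eq
    obtain ⟨⟨l, k⟩, tl, rfl⟩ : ∃ a t, loads = a :: t := by
      cases loads with
      | nil =>
        exfalso
        apply hne
        have : rs.length = 0 := by simpa using hlen.symm
        exact List.eq_nil_of_length_eq_zero this
      | cons a t => exact ⟨a, t, rfl⟩
    -- the head comes from some index j
    obtain ⟨j, hj, hpair⟩ := mem_pairsOf.mp (hperm.subset (List.mem_cons_self))
    have hl : l = rs.getD j 0 := congrArg Prod.fst hpair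
    have hk : k = (j : Int) := congrArg Prod.snd hpair
    have hrsj : rs[j] = l := by simp [hl, List.getD, List.getElem?_eq_getElem hj]
    -- l is a minimum of rs
    have hmin : ∀ x ∈ rs, l ≤ x := by
      intro x hx
      obtain ⟨t, ht, hxt⟩ := List.mem_iff_getElem.mp hx
      have hxmem : (x, (t : Int)) ∈ pairsOf rs := by
        refine mem_pairsOf.mpr ⟨t, ht, ?_⟩
        simp [List.getD, List.getElem?_eq_getElem ht, hxt]
      have := hperm.symm.subset hxmem
      rcases List.mem_cons.mp this with heq | hmem
      · have hxl : x = l := congrArg Prod.fst heq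
        omega
      · have h1 := (List.pairwise_cons.mp hsort).1 _ hmem
        simp only [lexLT] at h1
        omega
    have hlm : l ∈ rs := List.mem_iff_getElem.mpr ⟨j, hj, hrsj⟩
    -- min? rs = some l
    have hminq : PySem.List.min? rs (fun x => x) = some l := by
      cases rs with
      | nil => exact absurd rfl hne
      | cons r0 rt =>
        rw [PySem.List.min?_id_cons]
        have h1 := PySem.List.foldl_min_le rt r0
        have h2 := PySem.List.foldl_min_mem rt r0
        have hle : rt.foldl min r0 ≤ l := by
          rcases List.mem_cons.mp hlm with rfl | hmem
          · exact h1.1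
          · exact h1.2 _ hmem
        have hge : l ≤ rt.foldl min r0 := by
          rcases h2 with h2 | h2
          · rw [h2]; exact hmin r0 List.mem_cons_self
          · exact hmin _ (List.mem_cons_of_mem _ h2)
        exact congrArg some (le_antisymm hle hge)
    -- j is the FIRST index with value l
    have hfirst : ∀ t, t < j → rs[t]? ≠ some l := by
      intro t htj
      have ht : t < rs.length := htj.trans hj
      intro hcontra
      have hxt : rs[t] = l := by
        have := List.getElem?_eq_getElem ht
        rw [this] at hcontra; exact Option.some.inj hcontra
      have hmem : (l, (t : Int)) ∈ pairsOf rs := by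
        refine mem_pairsOf.mpr ⟨t, ht, ?_⟩
        simp [List.getD, List.getElem?_eq_getElem ht, hxt]
      have := hperm.symm.subset hmem
      rcases List.mem_cons.mp this with heq | hmem'
      · have : (t : Int) = k := congrArg Prod.snd heq
        omega
      · have h1 := (List.pairwise_cons.mp hsort).1 _ hmem'
        simp only [lexLT] at h1
        omega
    have hidx : PySem.List.index? rs l = some j := by
      rw [PySem.List.index?_eq_some_iff]
      refine ⟨rs.take j, rs.drop (j + 1), ?_, List.length_take_of_le (le_of_lt hj), ?_⟩
      · conv_lhs => rw [← List.take_append_drop j rs]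
        congr 1
        rw [List.drop_eq_getElem_cons hj, hrsj]
      · intro hcontra
        obtain ⟨t, ht, hxt⟩ := List.mem_iff_getElem.mp hcontra
        have htlen : t < j := by
          have := List.length_take_of_le (le_of_lt hj) ▸ ht
          omega
        apply hfirst t htlen
        rw [List.getElem_take] at hxt
        rw [List.getElem?_eq_getElem (htlen.trans hj), hxt]
    -- tl's second components avoid k
    have hsnd : ∀ y ∈ tl, y.2 ≠ k := by
      have hnd : (((l, k) :: tl).map (·.2)).Nodup := (hperm.map (·.2)).nodup_iff.mpr (pairsOf_snd_nodup rs)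
      intro y hy hcontra
      simp only [List.map_cons, List.nodup_cons] at hnd
      exact hnd.1 (hcontra ▸ List.mem_map_of_mem hy)
    -- permutation for the new state
    have hsplit : pairsOf rs = (pairsOf rs).take j ++ (l, k) :: (pairsOf rs).drop (j + 1) := by
      have hjp : j < (pairsOf rs).length := by simpa [pairsOf] using hj
      conv_lhs => rw [← List.take_append_drop j (pairsOf rs)]
      congr 1
      rw [List.drop_eq_getElem_cons hjp]
      congr 1
      simp [pairsOf, hl, hk]
    have htl_perm : tl.Perm ((pairsOf rs).take j ++ (pairsOf rs).drop (j + 1)) := by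
      have h1 : ((l, k) :: tl).Perm ((l, k) :: ((pairsOf rs).take j ++ (pairsOf rs).drop (j + 1))) :=
        (hsplit ▸ hperm).trans List.perm_middle
      exact h1.cons_inv
    have hperm' : (insortB tl (l + p, k)).Perm (pairsOf (rs.set j (l + p))) := by
      have hset : pairsOf (rs.set j (l + p)) = (pairsOf rs).set j (l + p, (j : Int)) :=
        pairsOf_set rs j hj (l + p)
      have hjp : j < (pairsOf rs).length := by simpa [pairsOf] using hj
      have hset2 : (pairsOf rs).set j (l + p, (j : Int)) =
          (pairsOf rs).take j ++ (l + p, (j : Int)) :: (pairsOf rs).drop (j + 1) := by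
        rw [List.set_eq_take_append_cons_drop, if_pos hjp]
      refine (insortB_perm tl (l + p, k)).trans ?_
      rw [hset, hset2, ← hk]
      exact (htl_perm.cons (l + p, k)).trans List.perm_middle.symm
    -- sortedness for the new state
    have hsort' : (insortB tl (l + p, k)).Pairwise lexLT :=
      insortB_pairwise tl (l + p, k) (List.pairwise_cons.mp hsort).2 hsnd
    -- step both sides
    have hne' : rs.set j (l + p) ≠ [] := by
      cases rs with
      | nil => exact absurd rfl hne
      | cons a t => cases j <;> simp
    have hgd : rs.getD j 0 + p = l + p := by rw [hl]
    have hkj : k.toNat = j := by rw [hk]; exact Int.toNat_natCast j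
    simp only [myAGo, myBGo, hminq, hidx, hkj, hgd]
    exact ih (i + 1) _ _ _ hne' hsort' hperm'

lemma init_loads (m : Int) :
    ((List.range m.toNat).map (fun (k : Nat) => ((0 : Int), (k : Int)))).Perm (pairsOf (List.replicate m.toNat (0 : Int)))
    ∧ ((List.range m.toNat).map (fun (k : Nat) => ((0 : Int), (k : Int)))).Pairwise lexLT := by
  constructor
  · have heq : pairsOf (List.replicate m.toNat (0 : Int))
        = (List.range m.toNat).map (fun (k : Nat) => ((0 : Int), (k : Int))) := by
      unfold pairsOf
      rw [List.length_replicate]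
      apply List.map_congr_left
      intro j hj
      have : (List.replicate m.toNat (0 : Int)).getD j 0 = 0 := by
        simp [List.getD, List.getElem?_replicate]
        split <;> rfl
      rw [this]
    rw [heq]
  · rw [List.pairwise_map]
    refine List.pairwise_lt_range.imp ?_
    intro a b hab
    refine Or.inr ⟨rfl, ?_⟩
    show (a : Int) < (b : Int)
    exact_mod_cast hab

-- ===== VERDICT (by name: the statement is the Claim_ definition above) =====
theorem myListScheduling_spec : Claim_equal_myListScheduling := by
  intro P m _ hpre
  unfold Spec_myListScheduling myListScheduling myListScheduling_alt
  rcases hpre with rfl | hm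
  · rfl
  · have hm' : 0 < m.toNat := by omega
    obtain ⟨hp, hs⟩ := init_loads m
    exact go_eq P 1 (List.replicate m.toNat []) _ _
      (by simp; omega) hs hp.symm.symm
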